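-- pv_equiv track=rewrite | github.com/AllenNeuralDynamics/TigerASI | tigerasi/tiger_controller.py | _get_axis_to_card_mapping
-- ===== SOURCE A (Python) =====
-- def _get_axis_to_card_mapping(build_config: dict):
--     """parse a build configuration dict to get axis-to-card relationship.
--
--     :return: a dict that looks like
--         ``{<axis>: (<hex_address>, <card_index>)), etc.}``
--
--     .. code-block:: python
--
--         # return type looks like:
--         {'X': (31, 0),
--          'Y': (31, 1)}
--
--     """
--     axis_to_card = {}
--     curr_card_index = {c: 0 for c in set(build_config['Hex Addr'])}
--     for axis, hex_addr in zip(build_config['Motor Axes'],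
--                               build_config['Hex Addr']):
--         card_index = curr_card_index[hex_addr]
--         axis_to_card[axis] = (hex_addr, card_index)
--         curr_card_index[hex_addr] = card_index + 1
--     return axis_to_card
-- ===== SOURCE B (Python) =====
-- def _get_axis_to_card_mapping(build_config: dict):
--     """parse a build configuration dict to get axis-to-card relationship."""
--     axes = build_config['Motor Axes']
--     hexes = build_config['Hex Addr']
--     # stage 1: group the positions of each hex address, in order
--     groups = {}
--     for i, h in enumerate(hexes):
--         groups.setdefault(h, []).append(i)
--     # stage 2: the card index of a position is its rank within its card's group
--     card_index = {}
--     for positions in groups.values():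
--         for rank, i in enumerate(positions):
--             card_index[i] = rank
--     # stage 3: emit in the original axis order
--     return {axis: (h, card_index[i])
--             for i, (axis, h) in enumerate(zip(axes, hexes))}
-- ===== Notes on version B (the rewrite author's own statement) =====
-- stated objective: alternative
-- what changed: Replaces A's single pass with a running per-card counter by a group-first decomposition: one pass groups the positions of each hex address, a second pass ranks each position within its group via enumerate, and a final pass emits axis -> (hex, rank) in the original order.
import Mathlib
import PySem

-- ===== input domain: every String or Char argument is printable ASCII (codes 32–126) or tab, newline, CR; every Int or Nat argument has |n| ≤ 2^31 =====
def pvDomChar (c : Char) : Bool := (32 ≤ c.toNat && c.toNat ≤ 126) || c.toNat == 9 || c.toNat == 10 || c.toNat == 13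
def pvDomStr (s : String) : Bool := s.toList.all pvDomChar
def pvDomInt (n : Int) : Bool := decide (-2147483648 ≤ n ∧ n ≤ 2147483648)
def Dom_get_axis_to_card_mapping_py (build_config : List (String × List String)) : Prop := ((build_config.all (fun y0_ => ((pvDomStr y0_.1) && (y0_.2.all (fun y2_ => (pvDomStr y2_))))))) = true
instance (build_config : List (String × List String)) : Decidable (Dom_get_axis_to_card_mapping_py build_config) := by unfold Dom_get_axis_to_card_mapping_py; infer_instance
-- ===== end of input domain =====

-- B replaces A's running per-card counter with a group-first decomposition: group the positions
-- of each hex address, rank each position inside its group, then emit in the original axis order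
-- (objective: alternative decomposition, same O(n) cost).

-- ===== PORT A =====
-- Port of A. Note: the lookup `curr_card_index[hex_addr]` cannot raise (every hex_addr of the
-- loop is a member of hexes, hence a key of curr_card_index), so `getD _ 0` returns its value.
def get_axis_to_card_mapping_py (build_config : List (String × List String)) : List (String × String × Int) :=
  match (PySem.Dict.mk build_config).get? "Motor Axes", (PySem.Dict.mk build_config).get? "Hex Addr" with
  | some axes, some hexes =>
    let curr_card_index : PySem.Dict String Int :=
      (PySem.Set.ofList hexes).foldl (fun d c => d.insert c 0) PySem.Dict.empty
    let st := (axes.zip hexes).foldl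
      (fun (st : PySem.Dict String (String × Int) × PySem.Dict String Int) p =>
        let card_index := st.2.getD p.2 0
        (st.1.insert p.1 (p.2, card_index), st.2.insert p.2 (card_index + 1)))
      (PySem.Dict.empty, curr_card_index)
    st.1.items
  | _, _ => []  -- unreachable under Pre_ (Python raises KeyError)

-- ===== PORT B =====
-- Port of B. Note: the lookup `card_index[i]` cannot raise (every position of the zip is a
-- position of hexes, hence ranked inside some group), so `getD _ 0` returns its value.
def get_axis_to_card_mapping_py_alt (build_config : List (String × List String)) : List (String × String × Int) :=
  match (PySem.Dict.mk build_config).get? "Motor Axes" with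
  | none => []  -- unreachable under Pre_ (Python raises KeyError)
  | some axes =>
  match (PySem.Dict.mk build_config).get? "Hex Addr" with
  | none => []  -- unreachable under Pre_ (Python raises KeyError)
  | some hexes =>
    let groups : PySem.Dict String (List Int) :=
      (PySem.List.enumerate hexes).foldl
        (fun d p => d.modify p.2 [] (fun l => l ++ [p.1])) PySem.Dict.empty
    let card_index : PySem.Dict Int Int :=
      groups.values.foldl
        (fun d L => (PySem.List.enumerate L).foldl (fun d q => d.insert q.2 q.1) d)
        PySem.Dict.empty
    ((PySem.List.enumerate (axes.zip hexes)).foldl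
      (fun (d : PySem.Dict String (String × Int)) ip =>
        d.insert ip.2.1 (ip.2.2, card_index.getD ip.1 0))
      PySem.Dict.empty).items


-- ===== PRECONDITION & SPEC =====
-- Pre_: the build-config dict must carry both the 'Motor Axes' and 'Hex Addr' keys (else A raises KeyError).
def Pre_get_axis_to_card_mapping_py (build_config : List (String × List String)) : Prop :=
  ((PySem.Dict.mk build_config).get? "Motor Axes").isSome = true ∧
  ((PySem.Dict.mk build_config).get? "Hex Addr").isSome = true
instance (build_config : List (String × List String)) : Decidable (Pre_get_axis_to_card_mapping_py build_config) := by
  unfold Pre_get_axis_to_card_mapping_py; infer_instance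

def pvWitness_get_axis_to_card_mapping_py : (List (String × List String)) :=
  [("Motor Axes", ["X", "Y", "Z"]), ("Hex Addr", ["31", "31", "32"])]

def Spec_get_axis_to_card_mapping_py (build_config : List (String × List String)) (out : List (String × String × Int)) : Prop := out = get_axis_to_card_mapping_py_alt build_config
instance (build_config : List (String × List String)) (out : List (String × String × Int)) : Decidable (Spec_get_axis_to_card_mapping_py build_config out) := by unfold Spec_get_axis_to_card_mapping_py; infer_instance

-- ===== CLAIM (what is proved, stated in full; the proofs are below) =====
def Claim_equal_get_axis_to_card_mapping_py : Prop := ∀ (build_config : List (String × List String)), Dom_get_axis_to_card_mapping_py build_config → Pre_get_axis_to_card_mapping_py build_config → Spec_get_axis_to_card_mapping_py build_config (get_axis_to_card_mapping_py build_config)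

-- ===== LEMMAS AND PROOFS =====

-- positions (as produced by enumerate starting at k) of the occurrences of h in l
def pvPos (l : List String) (k : Int) (h : String) : List Int :=
  ((PySem.List.enumerate l k).filter (fun p => p.2 == h)).map (·.1)

lemma pvPos_nil (k : Int) (h : String) : pvPos [] k h = [] := rfl

lemma pvPos_cons (x : String) (t : List String) (k : Int) (h : String) :
    pvPos (x :: t) k h = (if x = h then [k] else []) ++ pvPos t (k + 1) h := by
  simp [pvPos, PySem.List.enumerate_cons]
  split_ifs <;> simp_all

lemma pvPos_mem_lb (l : List String) (k : Int) (h : String) (x : Int) :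
    x ∈ pvPos l k h → k ≤ x := by
  induction l generalizing k with
  | nil => simp [pvPos_nil]
  | cons a t ih =>
      intro hx
      rw [pvPos_cons] at hx
      rcases List.mem_append.mp hx with h1 | h2
      · split_ifs at h1 <;> simp_all
      · have := ih (k + 1) h2; omega

lemma pvPos_nodup (l : List String) (k : Int) (h : String) : (pvPos l k h).Nodup := by
  induction l generalizing k with
  | nil => simp [pvPos_nil]
  | cons a t ih =>
      rw [pvPos_cons]
      split_ifs with hx
      · refine List.nodup_cons.mpr ⟨fun hm => ?_, ih (k + 1)⟩
        have := pvPos_mem_lb t (k + 1) h k hm; omega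
      · simpa using ih (k + 1)

lemma pvPos_mem_iff (l : List String) (k : Int) (h : String) (x : Int) :
    x ∈ pvPos l k h ↔ ∃ j : Nat, ∃ hj : j < l.length, x = k + j ∧ l[j] = h := by
  induction l generalizing k with
  | nil => simp [pvPos_nil]
  | cons a t ih =>
      rw [pvPos_cons]
      constructor
      · intro hx
        rcases List.mem_append.mp hx with h1 | h2
        · split_ifs at h1 with he
          · simp at h1
            exact ⟨0, by simp, by omega, by simpa using he⟩
          · simp at h1
        · obtain ⟨j, hj, hx', hl⟩ := (ih (k + 1)).mp h2
          exact ⟨j + 1, by simpa using hj, by push_cast; omega, by simpa using hl⟩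
      · rintro ⟨j, hj, rfl, hl⟩
        cases j with
        | zero => simp at hl ⊢; simp [hl]
        | succ j' =>
            refine List.mem_append.mpr (Or.inr ?_)
            refine (ih (k + 1)).mpr ⟨j', by simpa using hj, by push_cast; omega, by simpa using hl⟩

-- the rank of position k + i inside its group is the number of earlier equal hex addresses
lemma pvPos_idxOf (l : List String) (k : Int) (i : Nat) (hi : i < l.length) :
    (pvPos l k l[i]).idxOf (k + i) = (l.take i).count l[i] := by
  induction l generalizing k i with
  | nil => simp at hi
  | cons a t ih =>
      cases i with
      | zero =>
          simp only [List.getElem_cons_zero]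
          rw [pvPos_cons]
          simp
      | succ j =>
          have hj : j < t.length := by simpa using hi
          simp only [List.getElem_cons_succ]
          rw [pvPos_cons]
          by_cases he : a = t[j]
          · subst he
            rw [if_pos rfl, List.singleton_append, List.idxOf_cons]
            have hbe : (k == k + ((j : Int) + 1)) = false := by
              simp; omega
            push_cast
            rw [hbe]
            have h1 : (k + ((j : Int) + 1) : Int) = (k + 1) + j := by ring
            rw [cond_false, h1, ih (k + 1) j hj]
            simp
          · simp only [if_neg he, List.nil_append]
            have : (k + (j + 1 : Nat) : Int) = (k + 1) + j := by push_cast; ring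
            rw [this, ih (k + 1) j hj]
            simp [he]

-- stage 1: the grouping fold sends each hex address to the ordered list of its positions
lemma groups_getD (hexes : List String) (k : Int) (h : String) :
    ((PySem.List.enumerate hexes k).foldl
      (fun d p => d.modify p.2 [] (fun l => l ++ [p.1])) PySem.Dict.empty).getD h []
    = pvPos hexes k h := by
  have hswap : (PySem.List.enumerate hexes k).foldl
      (fun d p => d.modify p.2 [] (fun l => l ++ [p.1])) (PySem.Dict.empty : PySem.Dict String (List Int))
      = ((PySem.List.enumerate hexes k).map Prod.swap).foldl
          (fun d p => d.modify p.1 [] (fun l => l ++ [p.2])) PySem.Dict.empty := by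
    rw [List.foldl_map]
    rfl
  rw [hswap, PySem.Dict.getD_foldl_modify_append]
  simp [pvPos, PySem.Dict.getD_empty, List.filter_map, Function.comp_def]

lemma groups_keys (hexes : List String) (k : Int) :
    ((PySem.List.enumerate hexes k).foldl
      (fun d p => d.modify p.2 [] (fun l => l ++ [p.1]))
      (PySem.Dict.empty : PySem.Dict String (List Int))).keys
    = PySem.Set.ofList hexes := by
  rw [PySem.Dict.keys_foldl_modify_key]
  simp [PySem.List.map_snd_enumerate, PySem.Set.update, PySem.Set.ofList]

-- stage 2, inner loop: ranking a group leaves positions outside the group untouched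
lemma rank_unchanged (L : List Int) (k : Int) (d : PySem.Dict Int Int) (i : Int)
    (hni : i ∉ L) :
    ((PySem.List.enumerate L k).foldl (fun d q => d.insert q.2 q.1) d).getD i 0
    = d.getD i 0 := by
  induction L generalizing k d with
  | nil => rfl
  | cons x t ih =>
      rw [PySem.List.enumerate_cons]
      simp only [List.foldl_cons]
      rw [ih (k + 1) _ (fun hm => hni (List.mem_cons_of_mem _ hm))]
      rw [PySem.Dict.getD_insert, if_neg (fun he => hni (by rw [he]; exact List.mem_cons_self))]

-- stage 2, inner loop: a member of the group gets its rank within the group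
lemma rank_mem (L : List Int) (k : Int) (d : PySem.Dict Int Int) (i : Int)
    (hnd : L.Nodup) (hi : i ∈ L) :
    ((PySem.List.enumerate L k).foldl (fun d q => d.insert q.2 q.1) d).getD i 0
    = k + L.idxOf i := by
  induction L generalizing k d with
  | nil => simp at hi
  | cons x t ih =>
      rw [PySem.List.enumerate_cons]
      simp only [List.foldl_cons]
      by_cases he : i = x
      · subst he
        rw [rank_unchanged t (k + 1) _ i (List.nodup_cons.mp hnd).1]
        rw [PySem.Dict.getD_insert, if_pos rfl]
        simp
      · have hit : i ∈ t := by
          rcases List.mem_cons.mp hi with h1 | h2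
          · exact absurd h1 he
          · exact h2
        rw [ih (k + 1) _ (List.nodup_cons.mp hnd).2 hit]
        rw [List.idxOf_cons]
        have : (x == i) = false := by rw [beq_eq_false_iff_ne]; exact Ne.symm he
        rw [this, cond_false]
        push_cast
        ring

-- stage 2, outer loop: groups not containing position i leave its entry untouched
lemma outer_unchanged (hexes : List String) (ks : List String) (d : PySem.Dict Int Int)
    (i : Int) (h : ∀ h ∈ ks, i ∉ pvPos hexes 0 h) :
    (ks.foldl (fun d h =>
      (PySem.List.enumerate (pvPos hexes 0 h)).foldl (fun d q => d.insert q.2 q.1) d) d).getD i 0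
    = d.getD i 0 := by
  induction ks generalizing d with
  | nil => rfl
  | cons x t ih =>
      simp only [List.foldl_cons]
      rw [ih _ (fun h' hm => h h' (List.mem_cons_of_mem _ hm))]
      exact rank_unchanged _ _ _ _ (h x List.mem_cons_self)

-- stage 2, outer loop over the groups: position i ends ranked inside its own group
lemma outer_fold (hexes : List String) (ks : List String) (d : PySem.Dict Int Int)
    (i : Int) (hstar : String)
    (hnd : ks.Nodup) (hks : hstar ∈ ks)
    (hchar : ∀ h, i ∈ pvPos hexes 0 h ↔ h = hstar) :
    (ks.foldl (fun d h =>
      (PySem.List.enumerate (pvPos hexes 0 h)).foldl (fun d q => d.insert q.2 q.1) d) d).getD i 0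
    = (pvPos hexes 0 hstar).idxOf i := by
  induction ks generalizing d with
  | nil => simp at hks
  | cons x t ih =>
      simp only [List.foldl_cons]
      by_cases he : x = hstar
      · subst he
        have hnt : ∀ h ∈ t, i ∉ pvPos hexes 0 h := by
          intro h ht hm
          have := (hchar h).mp hm
          exact (List.nodup_cons.mp hnd).1 (this ▸ ht)
        rw [outer_unchanged hexes t _ i hnt]
        rw [rank_mem _ _ _ _ (pvPos_nodup hexes 0 x) ((hchar x).mpr rfl)]
        simp
      · have hit : hstar ∈ t := by
          rcases List.mem_cons.mp hks with h1 | h2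
          · exact absurd h1.symm he
          · exact h2
        have hnx : i ∉ pvPos hexes 0 x := fun hm => he ((hchar x).mp hm)
        rw [ih _ (List.nodup_cons.mp hnd).2 hit]

-- stages 1+2 combined: the rank dict assigns every position its prefix count
lemma card_index_getD (hexes : List String) (i : Nat) (hi : i < hexes.length) :
    ((((PySem.List.enumerate hexes).foldl
        (fun d p => d.modify p.2 [] (fun l => l ++ [p.1]))
        (PySem.Dict.empty : PySem.Dict String (List Int))).values).foldl
      (fun d L => (PySem.List.enumerate L).foldl (fun d q => d.insert q.2 q.1) d)
      (PySem.Dict.empty : PySem.Dict Int Int)).getD (i : Int) 0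
    = ((hexes.take i).count hexes[i] : Int) := by
  have hkeys := groups_keys hexes 0
  have hnd : (((PySem.List.enumerate hexes).foldl
      (fun d p => d.modify p.2 [] (fun l => l ++ [p.1]))
      (PySem.Dict.empty : PySem.Dict String (List Int))).keys).Nodup := by
    rw [hkeys]; exact PySem.Set.nodup_ofList hexes
  rw [PySem.Dict.values_eq_map_keys _ hnd []]
  have hmap : (((PySem.List.enumerate hexes).foldl
      (fun d p => d.modify p.2 [] (fun l => l ++ [p.1]))
      (PySem.Dict.empty : PySem.Dict String (List Int))).keys).map
        (fun k => ((PySem.List.enumerate hexes).foldl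
          (fun d p => d.modify p.2 [] (fun l => l ++ [p.1]))
          (PySem.Dict.empty : PySem.Dict String (List Int))).getD k [])
      = (PySem.Set.ofList hexes).map (fun h => pvPos hexes 0 h) := by
    rw [hkeys]
    exact List.map_congr_left (fun h _ => groups_getD hexes 0 h)
  rw [hmap, List.foldl_map]
  have hchar : ∀ h, (i : Int) ∈ pvPos hexes 0 h ↔ h = hexes[i] := by
    intro h
    rw [pvPos_mem_iff]
    constructor
    · rintro ⟨j, hj, hij, hl⟩
      have : j = i := by omega
      subst this
      exact hl.symm
    · intro he
      exact ⟨i, hi, by omega, he.symm⟩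
  rw [outer_fold hexes _ _ (i : Int) hexes[i] (PySem.Set.nodup_ofList hexes)
      ((PySem.Set.mem_ofList _ _).mpr (List.getElem_mem hi)) hchar]
  have h0 : (i : Int) = 0 + (i : Nat) := by omega
  rw [h0, pvPos_idxOf hexes 0 i hi]

-- every element of enumerate l k is (k + j, l[j]) for some valid j
lemma mem_enumerate_elim {α : Type} (l : List α) (k : Int) (ip : Int × α)
    (h : ip ∈ PySem.List.enumerate l k) :
    ∃ j : Nat, ∃ hj : j < l.length, ip = (k + j, l[j]) := by
  induction l generalizing k with
  | nil => simp [PySem.List.enumerate_nil] at h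
  | cons x t ih =>
      rw [PySem.List.enumerate_cons] at h
      rcases List.mem_cons.mp h with h1 | h2
      · exact ⟨0, by simp, by simpa using h1⟩
      · obtain ⟨j, hj, he⟩ := ih (k + 1) h2
        exact ⟨j + 1, by simpa using hj, by rw [he]; simp [Prod.ext_iff]; omega⟩

-- A side: the initial counter dict maps everything to 0 (keys hold 0, non-keys default to 0)
lemma getD_init_zero (s : List String) (d : PySem.Dict String Int)
    (hd : ∀ h, d.getD h 0 = 0) (h : String) :
    (s.foldl (fun d c => d.insert c 0) d).getD h 0 = 0 := by
  induction s generalizing d with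
  | nil => exact hd h
  | cons c t ih =>
      refine ih _ (fun h' => ?_)
      rw [PySem.Dict.getD_insert]
      split <;> simp [hd]

-- A side: with the counter agreeing with prefix counts, A's loop builds the dict that an
-- enumerate loop over the zip with explicit prefix counts builds
lemma loop_eq (hexes : List String) (l : List (String × String)) :
    ∀ (k : Nat) (atc : PySem.Dict String (String × Int)) (c : PySem.Dict String Int),
    (l.map Prod.snd).IsPrefix (hexes.drop k) →
    (∀ h, c.getD h 0 = ((hexes.take k).count h : Int)) →
    (l.foldl
      (fun (st : PySem.Dict String (String × Int) × PySem.Dict String Int) p =>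
        let card_index := st.2.getD p.2 0
        (st.1.insert p.1 (p.2, card_index), st.2.insert p.2 (card_index + 1)))
      (atc, c)).1
    = (PySem.List.enumerate l (k : Int)).foldl
        (fun (d : PySem.Dict String (String × Int)) ip =>
          d.insert ip.2.1 (ip.2.2, ((PySem.List.slice hexes none (some ip.1)).count ip.2.2 : Int)))
        atc := by
  induction l with
  | nil => intro k atc c _ _; simp [PySem.List.enumerate]
  | cons p rest ih =>
      intro k atc c hpre hc
      have hk : k < hexes.length := by
        have := hpre.length_le
        simp at this
        omega
      have hdrop : hexes.drop k = hexes[k] :: hexes.drop (k + 1) :=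
        List.drop_eq_getElem_cons hk
      obtain ⟨t, ht⟩ := hpre
      rw [hdrop] at ht
      simp only [List.map_cons, List.cons_append, List.cons_eq_cons] at ht
      have hhead : hexes[k] = p.2 := ht.1.symm
      have hpre' : (rest.map Prod.snd).IsPrefix (hexes.drop (k + 1)) := ⟨t, ht.2⟩
      have htake : hexes.take (k + 1) = hexes.take k ++ [p.2] := by
        rw [← hhead]; exact List.take_succ_eq_append_getElem hk
      rw [PySem.List.enumerate_cons]
      simp only [List.foldl_cons]
      rw [PySem.List.slice_to_natCast]
      have hcnt : c.getD p.2 0 = ((hexes.take k).count p.2 : Int) := hc p.2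
      rw [hcnt]
      have : ((k : Int) + 1) = ((k + 1 : Nat) : Int) := by push_cast; ring
      rw [this]
      refine ih (k + 1) _ _ hpre' (fun h => ?_)
      rw [PySem.Dict.getD_insert, htake]
      by_cases hh : h = p.2
      · subst hh
        simp [List.count_append]
      · simp [hh, hc h, List.count_append, Ne.symm hh]

lemma zip_snd_prefix (axes hexes : List String) :
    ((axes.zip hexes).map Prod.snd).IsPrefix hexes := by
  induction axes generalizing hexes with
  | nil => simp
  | cons a t ih =>
      cases hexes with
      | nil => simp
      | cons h ht =>
          obtain ⟨t', ht'⟩ := ih ht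
          exact ⟨t', by simp [ht']⟩

-- ===== VERDICT (by name: the statement is the Claim_ definition above) =====
theorem get_axis_to_card_mapping_py_spec : Claim_equal_get_axis_to_card_mapping_py := by
  intro bc _ hpre
  obtain ⟨h1, h2⟩ := hpre
  unfold Spec_get_axis_to_card_mapping_py get_axis_to_card_mapping_py get_axis_to_card_mapping_py_alt
  obtain ⟨axes, ha⟩ := Option.isSome_iff_exists.mp h1
  obtain ⟨hexes, hh⟩ := Option.isSome_iff_exists.mp h2
  rw [ha, hh]
  simp only
  congr 1
  have hA := loop_eq hexes (axes.zip hexes) 0 PySem.Dict.empty _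
    (by simpa using zip_snd_prefix axes hexes)
    (fun h => by
      rw [getD_init_zero (PySem.Set.ofList hexes) PySem.Dict.empty (fun _ => rfl) h]; simp)
  rw [show ((0 : Nat) : Int) = (0 : Int) from rfl] at hA
  rw [hA]
  refine PySem.List.foldl_congr_mem _ _ _ _ (fun d ip hip => ?_)
  obtain ⟨j, hj, he⟩ := mem_enumerate_elim _ _ _ hip
  have hjh : j < hexes.length := by
    rw [List.length_zip] at hj; omega
  subst he
  rw [List.getElem_zip]
  simp only [zero_add]
  rw [PySem.List.slice_to_natCast, card_index_getD hexes j hjh]
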